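-- pv_equiv track=rewrite | github.com/kackyt/mahjong-etl | scrape.py | num_to_hai
-- ===== SOURCE A (Python) =====
-- from typing import List, Dict, Tuple, Any, Set, Optional
--
-- def num_to_hai(num_list: List[int], has_aka: bool) -> str:
--     colors = ["m", "p", "s", "z"]
--     suit = None
--
--     pais: List[str] = []
--
--     for pn in sorted(num_list):
--         paistr = ""
--         s = colors[pn // 36]
--         if s != suit:
--             paistr = s
--             suit = s
--
--         n = (pn % 36) // 4 + 1
--         if has_aka and s != "z" and n == 5 and (pn % 4) == 0:
--             n = 0
--
--         paistr = paistr + str(n)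
--
--         pais.append(paistr)
--
--     return "".join(pais)
-- ===== SOURCE B (Python) =====
-- def num_to_hai(num_list, has_aka):
--     # Bucket tiles by color, then emit each non-empty bucket (letter once + sorted digits).
--     buckets = {c: [] for c in range(4)}
--     for pn in num_list:
--         buckets[pn // 36].append(pn)
--     colors = "mpsz"
--     parts = []
--     for c in range(4):
--         bucket = buckets[c]
--         if not bucket:
--             continue
--         parts.append(colors[c])
--         for pn in sorted(bucket):
--             n = (pn % 36) // 4 + 1
--             if has_aka and c != 3 and n == 5 and pn % 4 == 0:
--                 n = 0
--             parts.append(str(n))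
--     return "".join(parts)
-- ===== Notes on version B (the rewrite author's own statement) =====
-- stated objective: alternative
-- what changed: Instead of globally sorting and tracking a 'current suit' state through one pass, B groups tiles into four color buckets in one pass, then emits each non-empty bucket in m,p,s,z order: the color letter once, followed by the digits of the bucket sorted by tile number.
-- outside the precondition, e.g. on num_to_hai([-1], False): A returns 'z9', B raises KeyError
import Mathlib
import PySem

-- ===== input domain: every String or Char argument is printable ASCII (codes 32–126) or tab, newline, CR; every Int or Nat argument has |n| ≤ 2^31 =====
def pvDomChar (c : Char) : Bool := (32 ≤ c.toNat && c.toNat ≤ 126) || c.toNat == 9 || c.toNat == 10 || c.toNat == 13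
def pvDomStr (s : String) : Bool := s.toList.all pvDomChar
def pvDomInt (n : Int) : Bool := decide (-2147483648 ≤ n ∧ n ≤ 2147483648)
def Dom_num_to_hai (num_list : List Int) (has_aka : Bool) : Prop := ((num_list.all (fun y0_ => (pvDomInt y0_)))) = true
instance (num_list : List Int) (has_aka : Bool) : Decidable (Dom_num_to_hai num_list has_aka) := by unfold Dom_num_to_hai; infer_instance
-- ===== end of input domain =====

-- B replaces A's single sorted pass with a changing-suit state by bucketing tiles per color and
-- emitting each non-empty bucket (suit letter once, then its sorted digits); same cost, alternative decomposition.

-- ===== PORT A =====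
-- the loop body of A (suit-state × accumulated strings)
def numToHaiStep (has_aka : Bool) (st : Option String × List String) (pn : Int) : Option String × List String :=
  let colors : List String := ["m", "p", "s", "z"]
  -- colors[pn // 36]: none = IndexError (excluded by Pre_); .getD "" is never taken inside Pre_
  let s := (PySem.List.pyGet? colors (PySem.Int.floordiv pn 36)).getD ""
  let (paistr, suit) := if some s ≠ st.1 then (s, some s) else ("", st.1)
  let n : Int := PySem.Int.floordiv (PySem.Int.mod pn 36) 4 + 1
  let n := if has_aka = true ∧ s ≠ "z" ∧ n = 5 ∧ PySem.Int.mod pn 4 = 0 then 0 else n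
  (suit, st.2 ++ [paistr ++ PySem.Int.toStr n])

def num_to_hai (num_list : List Int) (has_aka : Bool) : String :=
  PySem.Str.join "" ((PySem.List.sorted num_list (fun x => x)).foldl (numToHaiStep has_aka) (none, [])).2

-- ===== PORT B =====
-- digit of one tile in bucket c (B tests c != 3 instead of the letter)
def altDigit (has_aka : Bool) (c : Int) (pn : Int) : String :=
  let n : Int := PySem.Int.floordiv (PySem.Int.mod pn 36) 4 + 1
  let n := if has_aka = true ∧ c ≠ 3 ∧ n = 5 ∧ PySem.Int.mod pn 4 = 0 then 0 else n
  PySem.Int.toStr n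

def num_to_hai_alt (num_list : List Int) (has_aka : Bool) : String :=
  -- buckets = {c: [] for c in range(4)}
  let buckets : PySem.Dict Int (List Int) :=
    (PySem.List.pyRange 0 4 1).foldl (fun d c => d.insert c ([] : List Int)) PySem.Dict.empty
  -- buckets[pn // 36].append(pn); inside Pre_ the key is always present, so Dict.modify is the in-place append
  let buckets := num_list.foldl
    (fun d pn => d.modify (PySem.Int.floordiv pn 36) [] (fun b => b ++ [pn])) buckets
  let colors : String := "mpsz"
  let parts := (PySem.List.pyRange 0 4 1).foldl
    (fun (parts : List String) c =>
      let bucket := buckets.getD c []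
      if bucket = [] then parts
      else
        -- colors[c] is a one-character string
        let parts := parts ++ [((PySem.Str.pyGet? colors c).map (fun ch => String.ofList [ch])).getD ""]
        (PySem.List.sorted bucket (fun x => x)).foldl
          (fun ps pn => ps ++ [altDigit has_aka c pn]) parts)
    []
  PySem.Str.join "" parts

-- ===== PRECONDITION & SPEC =====
-- Pre_ restricts to the natural tile domain 0 ≤ pn < 144 (4 colors × 36 codes): outside it A either raises
-- IndexError (pn // 36 outside -4..3) or, for negative pn, returns a value produced by Python's negative-index
-- wraparound on colors, where B's bucket lookup raises KeyError.
def Pre_num_to_hai (num_list : List Int) (has_aka : Bool) : Prop :=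
  ∀ pn ∈ num_list, 0 ≤ pn ∧ pn < 144
instance (num_list : List Int) (has_aka : Bool) : Decidable (Pre_num_to_hai num_list has_aka) := by
  unfold Pre_num_to_hai; infer_instance

def pvWitness_num_to_hai : List Int × Bool := ([16, 52, 88, 124, 16, 18], true)

def Spec_num_to_hai (num_list : List Int) (has_aka : Bool) (out : String) : Prop := out = num_to_hai_alt num_list has_aka
instance (num_list : List Int) (has_aka : Bool) (out : String) : Decidable (Spec_num_to_hai num_list has_aka out) := by unfold Spec_num_to_hai; infer_instance

-- ===== CLAIM (what is proved, stated in full; the proofs are below) =====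
def Claim_equal_num_to_hai : Prop := ∀ (num_list : List Int) (has_aka : Bool), Dom_num_to_hai num_list has_aka → Pre_num_to_hai num_list has_aka → Spec_num_to_hai num_list has_aka (num_to_hai num_list has_aka)

-- ===== LEMMAS AND PROOFS =====

-- the color key of a tile
def keyOf (pn : Int) : Int := PySem.Int.floordiv pn 36

-- the suit letter of bucket c, as A computes it
def letterS (c : Int) : String := (PySem.List.pyGet? ["m", "p", "s", "z"] c).getD ""

-- the tiles of bucket c, in input order
def bucketL (num_list : List Int) (c : Int) : List Int :=
  num_list.filter (fun pn => keyOf pn == c)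

-- sorted bucket c
def sbucket (num_list : List Int) (c : Int) : List Int :=
  PySem.List.sorted (bucketL num_list c) (fun x => x)

-- B's strings for bucket c
def segB (has_aka : Bool) (num_list : List Int) (c : Int) : List String :=
  if sbucket num_list c = [] then []
  else letterS c :: (sbucket num_list c).map (altDigit has_aka c)

-- A's strings for bucket c (the letter is glued onto the first digit)
def segA (has_aka : Bool) (num_list : List Int) (c : Int) : List String :=
  match sbucket num_list c with
  | [] => []
  | x :: rest => (letterS c ++ altDigit has_aka c x) :: rest.map (fun pn => "" ++ altDigit has_aka c pn)

lemma keyOf_mono {a b : Int} (h : a ≤ b) : keyOf a ≤ keyOf b := by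
  unfold keyOf
  rw [PySem.Int.floordiv_eq_ediv_of_pos (by omega), PySem.Int.floordiv_eq_ediv_of_pos (by omega)]
  exact Int.ediv_le_ediv (by omega) h

lemma mem_bucketL {num_list : List Int} {c pn : Int} (h : pn ∈ bucketL num_list c) :
    keyOf pn = c := by
  unfold bucketL at h
  have := List.of_mem_filter h
  simpa using this

lemma mem_sbucket {num_list : List Int} {c pn : Int} (h : pn ∈ sbucket num_list c) :
    keyOf pn = c := by
  unfold sbucket at h
  exact mem_bucketL ((PySem.List.mem_sorted (bucketL num_list c) (fun x => x) false pn).mp h)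

-- A's step on a tile of bucket c
lemma stepA_eq (has_aka : Bool) (suit : Option String) (acc : List String) (pn c : Int)
    (hk : keyOf pn = c) (hc : 0 ≤ c ∧ c < 4) :
    numToHaiStep has_aka (suit, acc) pn =
      ((some (letterS c)),
       acc ++ [(if some (letterS c) ≠ suit then letterS c else "") ++ altDigit has_aka c pn]) := by
  have h03 : c = 0 ∨ c = 1 ∨ c = 2 ∨ c = 3 := by omega
  unfold keyOf at hk
  rcases h03 with rfl | rfl | rfl | rfl <;>
    simp only [numToHaiStep, altDigit, letterS, hk] <;>
    (norm_num [PySem.List.pyGet?, PySem.List.pyIdx?, List.getElem_cons_succ]; split_ifs <;> simp_all)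

-- fold of A's step over a bucket whose letter is already the current suit
lemma foldA_in (has_aka : Bool) (c : Int) (hc : 0 ≤ c ∧ c < 4) :
    ∀ (xs : List Int) (acc : List String), (∀ pn ∈ xs, keyOf pn = c) →
    xs.foldl (numToHaiStep has_aka) (some (letterS c), acc) =
      (some (letterS c), acc ++ xs.map (fun pn => "" ++ altDigit has_aka c pn)) := by
  intro xs
  induction xs with
  | nil => intro acc _; simp
  | cons x t ih =>
    intro acc hx
    rw [List.foldl_cons, stepA_eq has_aka _ acc x c (hx x (by simp)) hc]
    rw [if_neg (by simp)]
    rw [ih _ (fun pn hpn => hx pn (by simp [hpn]))]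
    simp

-- letters of distinct buckets differ
lemma letterS_ne {c c' : Int} (hc : 0 ≤ c ∧ c < 4) (hc' : 0 ≤ c' ∧ c' < 4) (h : c' ≠ c) :
    letterS c' ≠ letterS c := by
  have h1 : c = 0 ∨ c = 1 ∨ c = 2 ∨ c = 3 := by omega
  have h2 : c' = 0 ∨ c' = 1 ∨ c' = 2 ∨ c' = 3 := by omega
  rcases h1 with rfl | rfl | rfl | rfl <;> rcases h2 with rfl | rfl | rfl | rfl <;>
    first | (exact absurd rfl h) | decide

-- fold of A's step over one whole bucket, entering with an earlier suit
lemma foldA_seg (has_aka : Bool) (num_list : List Int) (c : Int) (hc : 0 ≤ c ∧ c < 4)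
    (suit : Option String) (acc : List String)
    (hsuit : suit = none ∨ ∃ c', 0 ≤ c' ∧ c' < c ∧ suit = some (letterS c')) :
    (sbucket num_list c).foldl (numToHaiStep has_aka) (suit, acc) =
      ((if sbucket num_list c = [] then suit else some (letterS c)),
       acc ++ segA has_aka num_list c) := by
  have hne : suit ≠ some (letterS c) := by
    rcases hsuit with rfl | ⟨c', hc1, hc2, rfl⟩
    · simp
    · simp only [ne_eq, Option.some_inj]
      exact letterS_ne hc ⟨hc1, by omega⟩ (by omega)
  rcases hb : sbucket num_list c with _ | ⟨x, rest⟩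
  · simp [segA, hb]
  · have hkx : keyOf x = c := mem_sbucket (by rw [hb]; simp)
    rw [List.foldl_cons, stepA_eq has_aka suit acc x c hkx hc]
    rw [if_pos (by simpa using (Ne.symm hne))]
    rw [foldA_in has_aka c hc rest _
        (fun pn hpn => mem_sbucket (by rw [hb]; simp [hpn]))]
    simp [segA, hb]

-- the sorted input is the concatenation of the four sorted buckets
lemma partition4_perm (l : List Int) (h : ∀ x ∈ l, 0 ≤ keyOf x ∧ keyOf x < 4) :
    (bucketL l 0 ++ bucketL l 1 ++ bucketL l 2 ++ bucketL l 3).Perm l := by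
  rw [List.perm_iff_count]
  intro a
  simp only [bucketL, List.count_append]
  by_cases ha : a ∈ l
  · have h4 : keyOf a = 0 ∨ keyOf a = 1 ∨ keyOf a = 2 ∨ keyOf a = 3 := by
      have := h a ha; omega
    have hz : ∀ (c : Int), keyOf a ≠ c → List.count a (List.filter (fun pn => keyOf pn == c) l) = 0 := by
      intro c hcne
      refine List.count_eq_zero.mpr (fun hmem => ?_)
      have h2 := (List.mem_filter.mp hmem).2
      simp only [beq_iff_eq] at h2
      exact hcne h2
    rcases h4 with h4 | h4 | h4 | h4
    · rw [List.count_filter (p := fun pn => keyOf pn == 0) (by simp [h4]),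
        hz 1 (by omega), hz 2 (by omega), hz 3 (by omega)]; omega
    · rw [List.count_filter (p := fun pn => keyOf pn == 1) (by simp [h4]),
        hz 0 (by omega), hz 2 (by omega), hz 3 (by omega)]; omega
    · rw [List.count_filter (p := fun pn => keyOf pn == 2) (by simp [h4]),
        hz 0 (by omega), hz 1 (by omega), hz 3 (by omega)]; omega
    · rw [List.count_filter (p := fun pn => keyOf pn == 3) (by simp [h4]),
        hz 0 (by omega), hz 1 (by omega), hz 2 (by omega)]; omega
  · refine by simp [List.count_eq_zero_of_not_mem ha,
      List.count_eq_zero_of_not_mem (fun hm => ha (List.mem_of_mem_filter hm) : a ∉ List.filter (fun pn => keyOf pn == 0) l),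
      List.count_eq_zero_of_not_mem (fun hm => ha (List.mem_of_mem_filter hm) : a ∉ List.filter (fun pn => keyOf pn == 1) l),
      List.count_eq_zero_of_not_mem (fun hm => ha (List.mem_of_mem_filter hm) : a ∉ List.filter (fun pn => keyOf pn == 2) l),
      List.count_eq_zero_of_not_mem (fun hm => ha (List.mem_of_mem_filter hm) : a ∉ List.filter (fun pn => keyOf pn == 3) l)]

lemma le_of_mem_sbuckets {num_list : List Int} {i j a b : Int}
    (hij : i < j) (ha : a ∈ sbucket num_list i) (hb : b ∈ sbucket num_list j) : a ≤ b := by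
  by_contra hab
  have h1 : keyOf a = i := mem_sbucket ha
  have h2 : keyOf b = j := mem_sbucket hb
  have := keyOf_mono (a := b) (b := a) (by omega)
  omega

lemma sbucket_perm (num_list : List Int) (c : Int) :
    (sbucket num_list c).Perm (bucketL num_list c) :=
  PySem.List.sorted_perm (bucketL num_list c) (fun x => x) false

lemma sorted_decomp (num_list : List Int)
    (hk : ∀ pn ∈ num_list, 0 ≤ keyOf pn ∧ keyOf pn < 4) :
    PySem.List.sorted num_list (fun x => x) =
      sbucket num_list 0 ++ sbucket num_list 1 ++ sbucket num_list 2 ++ sbucket num_list 3 := by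
  apply List.Perm.eq_of_pairwise (le := fun (a b : Int) => a ≤ b)
  · intro a b _ _ h1 h2; omega
  · exact PySem.List.sorted_pairwise num_list (fun x => x)
  · -- pairwise ≤ of the concatenation of the sorted buckets
    rw [List.pairwise_append, List.pairwise_append, List.pairwise_append]
    refine ⟨⟨⟨PySem.List.sorted_pairwise _ _, PySem.List.sorted_pairwise _ _, ?_⟩,
      PySem.List.sorted_pairwise _ _, ?_⟩, PySem.List.sorted_pairwise _ _, ?_⟩
    · exact fun a ha b hb => le_of_mem_sbuckets (by omega) ha hb
    · intro a ha b hb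
      rcases List.mem_append.mp ha with h | h
      · exact le_of_mem_sbuckets (by omega) h hb
      · exact le_of_mem_sbuckets (by omega) h hb
    · intro a ha b hb
      rcases List.mem_append.mp ha with h | h
      · rcases List.mem_append.mp h with h' | h'
        · exact le_of_mem_sbuckets (by omega) h' hb
        · exact le_of_mem_sbuckets (by omega) h' hb
      · exact le_of_mem_sbuckets (by omega) h hb
  · have big : (sbucket num_list 0 ++ sbucket num_list 1 ++ sbucket num_list 2 ++ sbucket num_list 3).Perm
        (bucketL num_list 0 ++ bucketL num_list 1 ++ bucketL num_list 2 ++ bucketL num_list 3) :=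
      (((sbucket_perm num_list 0).append (sbucket_perm num_list 1)).append
        (sbucket_perm num_list 2)).append (sbucket_perm num_list 3)
    exact (PySem.List.sorted_perm num_list (fun x => x) false).trans
      ((partition4_perm num_list hk).symm.trans big.symm)

-- B's buckets dictionary holds exactly bucketL
lemma buckets_getD (num_list : List Int) (c : Int) :
    ((num_list.foldl (fun d pn => d.modify (PySem.Int.floordiv pn 36) [] (fun b => b ++ [pn]))
        ((PySem.List.pyRange 0 4 1).foldl (fun d c => d.insert c ([] : List Int)) PySem.Dict.empty)).getD c [])
      = bucketL num_list c := by
  have h1 : num_list.foldl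
      (fun d pn => d.modify (PySem.Int.floordiv pn 36) [] (fun b => b ++ [pn]))
      ((PySem.List.pyRange 0 4 1).foldl (fun d c => d.insert c ([] : List Int)) PySem.Dict.empty)
      = (num_list.map (fun pn => (keyOf pn, pn))).foldl
          (fun d p => d.modify p.1 [] (fun b => b ++ [p.2]))
          ((PySem.List.pyRange 0 4 1).foldl (fun d c => d.insert c ([] : List Int)) PySem.Dict.empty) := by
    rw [List.foldl_map]; rfl
  rw [h1, PySem.Dict.getD_foldl_modify_append]
  have h0 : ((PySem.List.pyRange 0 4 1).foldl (fun d c => d.insert c ([] : List Int)) PySem.Dict.empty)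
      = PySem.Dict.mk [(0, []), (1, []), (2, []), (3, [])] := by rfl
  rw [h0]
  have h2 : (PySem.Dict.mk [((0 : Int), ([] : List Int)), (1, []), (2, []), (3, [])]).getD c [] = [] := by
    simp only [PySem.Dict.getD_eq_get?_getD, PySem.Dict.get?_mk_cons]
    split_ifs <;> rfl
  rw [h2, List.filter_map, List.map_map]
  simp [bucketL, Function.comp_def]

-- join "" is flatten on the character lists
lemma join_empty_eq (l : List String) :
    PySem.Str.join "" l = String.ofList (l.map String.toList).flatten := by
  rw [← String.toList_inj, PySem.Str.toList_join]
  have hnil : ("" : String).toList = [] := rfl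
  rw [hnil]
  have hjoin : ∀ (m : List (List Char)), PySem.Chars.join [] m = m.flatten := by
    intro m
    induction m with
    | nil => simp [PySem.Chars.join_nil]
    | cons x xs ih =>
      cases xs with
      | nil => rw [PySem.Chars.join_singleton]; simp
      | cons y ys => rw [PySem.Chars.join_cons_cons]; simp_all
  rw [hjoin]
  simp

-- the two per-bucket string lists have the same characters
lemma seg_flatten (has_aka : Bool) (num_list : List Int) (c : Int) :
    ((segA has_aka num_list c).map String.toList).flatten
      = ((segB has_aka num_list c).map String.toList).flatten := by
  unfold segA segB
  rcases hb : sbucket num_list c with _ | ⟨x, rest⟩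
  · simp
  · simp [String.toList_append, List.map_map, Function.comp_def]

-- one step of B's outer loop appends segB
lemma segB_step (has_aka : Bool) (num_list : List Int) (c : Int) (parts : List String) :
    (if bucketL num_list c = [] then parts
     else (parts ++ [letterS c]) ++ (sbucket num_list c).map (altDigit has_aka c))
      = parts ++ segB has_aka num_list c := by
  unfold segB
  by_cases hb : bucketL num_list c = []
  · rw [if_pos hb, if_pos (by simp [sbucket, PySem.List.sorted_eq_nil_iff, hb])]
    simp
  · rw [if_neg hb, if_neg (by simp [sbucket, PySem.List.sorted_eq_nil_iff, hb])]
    simp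

-- B's result, bucket by bucket
lemma alt_eq (num_list : List Int) (has_aka : Bool) :
    num_to_hai_alt num_list has_aka =
      PySem.Str.join "" (segB has_aka num_list 0 ++ segB has_aka num_list 1 ++
        segB has_aka num_list 2 ++ segB has_aka num_list 3) := by
  have bgetD : ∀ (c : Int),
      ((List.foldl (fun d pn => d.modify (PySem.Int.floordiv pn 36) [] (fun b => b ++ [pn]))
        ((((PySem.Dict.empty.insert (0 : Int) ([] : List Int)).insert 1 []).insert 2 []).insert 3 [])
        num_list).getD c [])
      = bucketL num_list c := fun c => buckets_getD num_list c
  have hl : ∀ (c : Int), 0 ≤ c → c < 4 →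
      ((PySem.Str.pyGet? "mpsz" c).map (fun ch => String.ofList [ch])).getD "" = letterS c := by
    intro c h1 h2
    have h03 : c = 0 ∨ c = 1 ∨ c = 2 ∨ c = 3 := by omega
    rcases h03 with rfl | rfl | rfl | rfl <;> decide
  simp only [num_to_hai_alt]
  rw [show PySem.List.pyRange 0 4 1 = [0, 1, 2, 3] from rfl]
  simp only [List.foldl_cons, List.foldl_nil, PySem.List.foldl_append_singleton_eq_map]
  rw [bgetD 0, bgetD 1, bgetD 2, bgetD 3,
    hl 0 (by omega) (by omega), hl 1 (by omega) (by omega),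
    hl 2 (by omega) (by omega), hl 3 (by omega) (by omega)]
  rw [show (PySem.List.sorted (bucketL num_list 0) (fun x => x)) = sbucket num_list 0 from rfl,
    show (PySem.List.sorted (bucketL num_list 1) (fun x => x)) = sbucket num_list 1 from rfl,
    show (PySem.List.sorted (bucketL num_list 2) (fun x => x)) = sbucket num_list 2 from rfl,
    show (PySem.List.sorted (bucketL num_list 3) (fun x => x)) = sbucket num_list 3 from rfl]
  rw [segB_step, segB_step, segB_step, segB_step]
  simp

-- ===== VERDICT (by name: the statement is the Claim_ definition above) =====
theorem num_to_hai_spec : Claim_equal_num_to_hai := by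
  intro num_list has_aka hdom hpre
  unfold Spec_num_to_hai
  have hk : ∀ pn ∈ num_list, 0 ≤ keyOf pn ∧ keyOf pn < 4 := by
    intro pn hm
    have h := hpre pn hm
    unfold keyOf
    rw [PySem.Int.floordiv_eq_ediv_of_pos (by omega)]
    omega
  rw [alt_eq]
  unfold num_to_hai
  rw [sorted_decomp num_list hk, List.foldl_append, List.foldl_append, List.foldl_append]
  rw [foldA_seg has_aka num_list 0 (by omega) none [] (Or.inl rfl)]
  rw [foldA_seg has_aka num_list 1 (by omega) _ _ ?hs1]
  case hs1 =>
    by_cases h : sbucket num_list 0 = []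
    · left; simp [h]
    · right; exact ⟨0, by omega, by omega, by simp [h]⟩
  rw [foldA_seg has_aka num_list 2 (by omega) _ _ ?hs2]
  case hs2 =>
    by_cases h1 : sbucket num_list 1 = []
    · by_cases h0 : sbucket num_list 0 = []
      · left; simp [h0, h1]
      · right; exact ⟨0, by omega, by omega, by simp [h0, h1]⟩
    · right; exact ⟨1, by omega, by omega, by simp [h1]⟩
  rw [foldA_seg has_aka num_list 3 (by omega) _ _ ?hs3]
  case hs3 =>
    by_cases h2 : sbucket num_list 2 = []
    · by_cases h1 : sbucket num_list 1 = []
      · by_cases h0 : sbucket num_list 0 = []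
        · left; simp [h0, h1, h2]
        · right; exact ⟨0, by omega, by omega, by simp [h0, h1, h2]⟩
      · right; exact ⟨1, by omega, by omega, by simp [h1, h2]⟩
    · right; exact ⟨2, by omega, by omega, by simp [h2]⟩
  rw [join_empty_eq, join_empty_eq]
  rw [← String.toList_inj]
  simp only [List.map_append, List.flatten_append, seg_flatten]
  simp
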